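-- pv_equiv track=rewrite | github.com/MrRoush/blender-github-classroom-addon | github_classroom_addon/github_client.py | compute_assignment_groups
-- ===== SOURCE A (Python) =====
-- from typing import Optional, List, Dict, Any, Tuple
--
-- def compute_assignment_groups(
--     repo_names: List[str],
-- ) -> Dict[str, str]:
--     """
--     Compute assignment grouping for teacher view.
--     Uses the GitHub Classroom naming convention: {assignment}-{username}
--     Returns a dict mapping repo_name -> assignment_name.
--     Repos that don't match any group get an empty assignment_name.
--     """
--     # Count how many repos share each possible hyphen-delimited prefix
--     prefix_counts: Dict[str, int] = {}
--     for name in repo_names: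
--         parts = name.split('-')
--         for i in range(1, len(parts)):
--             prefix = '-'.join(parts[:i])
--             prefix_counts[prefix] = prefix_counts.get(prefix, 0) + 1
--
--     # For each repo, find the longest prefix shared with at least
--     # one other repo. That prefix is the assignment name.
--     result: Dict[str, str] = {}
--     for name in repo_names:
--         parts = name.split('-')
--         best_prefix = ''
--         for i in range(len(parts) - 1, 0, -1):
--             prefix = '-'.join(parts[:i])
--             if prefix_counts.get(prefix, 0) >= 2:
--                 best_prefix = prefix
--                 break
--         result[name] = best_prefix
--
--     return result
-- ===== SOURCE B (Python) =====
-- from typing import List, Dict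
--
--
-- def _lcp(a: List[str], b: List[str]) -> int:
--     n = 0
--     for x, y in zip(a, b):
--         if x != y:
--             break
--         n += 1
--     return n
--
--
-- def compute_assignment_groups(
--     repo_names: List[str],
-- ) -> Dict[str, str]:
--     # No prefix-count table: for each repo, take the longest hyphen-token
--     # prefix it shares with ANY other repo, capped to a proper prefix of
--     # both (a repo only "offers" its proper prefixes as assignment names).
--     toks = [name.split('-') for name in repo_names]
--     result: Dict[str, str] = {}
--     for i, (name, parts) in enumerate(zip(repo_names, toks)):
--         best = 0
--         for j, other in enumerate(toks):
--             if j != i: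
--                 t = min(_lcp(parts, other), len(parts) - 1, len(other) - 1)
--                 if t > best:
--                     best = t
--         result[name] = '-'.join(parts[:best])
--     return result
-- ===== Notes on version B (the rewrite author's own statement) =====
-- stated objective: alternative
-- what changed: B drops A's global prefix-count dictionary entirely: for each repo it maximizes the longest common hyphen-token prefix against every other repo directly (pairwise LCP, capped to a proper prefix of both), so no counting table or string-keyed lookups exist.
import Mathlib
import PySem

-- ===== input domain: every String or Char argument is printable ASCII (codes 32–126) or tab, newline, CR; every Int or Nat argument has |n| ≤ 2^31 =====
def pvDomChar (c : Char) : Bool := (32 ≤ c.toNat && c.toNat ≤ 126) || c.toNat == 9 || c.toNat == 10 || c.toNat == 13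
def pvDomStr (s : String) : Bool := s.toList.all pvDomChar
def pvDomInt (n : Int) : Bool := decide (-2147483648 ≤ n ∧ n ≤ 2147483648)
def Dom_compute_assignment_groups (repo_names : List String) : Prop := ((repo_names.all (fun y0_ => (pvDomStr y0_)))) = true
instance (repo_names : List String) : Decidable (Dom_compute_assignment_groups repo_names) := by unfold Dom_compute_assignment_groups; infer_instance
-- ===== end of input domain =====

-- B drops A's global prefix-count dictionary: for each repo it directly maximizes the
-- longest common hyphen-token prefix against every other repo (pairwise LCP, capped to a
-- proper prefix of both). Alternative algorithm, same result; not claimed faster.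

-- ===== PORT A =====

-- name.split('-')
def pvPeel (n : String) : List String := (PySem.Str.split? n "-").getD []

-- '-'.join(parts[:i])
def pvKeyAt (parts : List String) (i : Int) : String :=
  PySem.Str.join "-" (PySem.List.slice parts none (some i))

-- the inner backward loop with break: first i with count >= 2, else ''
def pvBestLoop (pc : PySem.Dict String Int) (parts : List String) : List Int → String
  | [] => ""
  | i :: rest =>
      let pre := pvKeyAt parts i
      if pc.getD pre 0 ≥ 2 then pre else pvBestLoop pc parts rest

def compute_assignment_groups (repo_names : List String) : List (String × String) :=
  let prefix_counts : PySem.Dict String Int :=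
    repo_names.foldl (fun pc name =>
      let parts := pvPeel name
      (PySem.List.pyRange 1 (parts.length : Int) 1).foldl (fun pc i =>
        let pre := pvKeyAt parts i
        pc.insert pre (pc.getD pre 0 + 1)) pc)
      PySem.Dict.empty
  (repo_names.foldl (fun res name =>
      let parts := pvPeel name
      res.insert name
        (pvBestLoop prefix_counts parts
          (PySem.List.pyRange ((parts.length : Int) - 1) 0 (-1))))
    (PySem.Dict.empty : PySem.Dict String String)).items

-- ===== PORT B =====

-- _lcp(a, b): zip walk, break on first mismatch
def pvLcpB : List String → List String → Int
  | x :: a, y :: b => if x = y then 1 + pvLcpB a b else 0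
  | _, _ => 0

-- min(_lcp(parts, other), len(parts) - 1, len(other) - 1)
def pvCap (parts other : List String) : Int :=
  min (min (pvLcpB parts other) ((parts.length : Int) - 1)) ((other.length : Int) - 1)

def compute_assignment_groups_alt (repo_names : List String) : List (String × String) :=
  let toks := repo_names.map (fun name => pvPeel name)
  ((PySem.List.enumerate (repo_names.zip toks) 0).foldl (fun res ip =>
      let i := ip.1
      let name := ip.2.1
      let parts := ip.2.2
      let best := (PySem.List.enumerate toks 0).foldl (fun best jq =>
          if jq.1 ≠ i then
            let t := pvCap parts jq.2
            if t > best then t else best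
          else best) (0 : Int)
      res.insert name (PySem.Str.join "-" (PySem.List.slice parts none (some best))))
    (PySem.Dict.empty : PySem.Dict String String)).items

-- ===== PRECONDITION & SPEC =====
def Spec_compute_assignment_groups (repo_names : List String) (out : List (String × String)) : Prop := out = compute_assignment_groups_alt repo_names
instance (repo_names : List String) (out : List (String × String)) : Decidable (Spec_compute_assignment_groups repo_names out) := by unfold Spec_compute_assignment_groups; infer_instance

-- ===== CLAIM (what is proved, stated in full; the proofs are below) =====
def Claim_equal_compute_assignment_groups : Prop := ∀ (repo_names : List String), Dom_compute_assignment_groups repo_names → Spec_compute_assignment_groups repo_names (compute_assignment_groups repo_names)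

-- ===== LEMMAS AND PROOFS =====

-- the sequence of hyphen prefixes of p :: ts, shortest first (proof-side object)
def pvPrefSeq (p : String) : List String → List String
  | [] => []
  | t :: ts => p :: pvPrefSeq (p ++ "-" ++ t) ts

def pvPrefSeqOf : List String → List String
  | [] => []
  | p :: ts => pvPrefSeq p ts

-- '-'.join of the first t tokens
def pvK (P : List String) (t : Nat) : String := PySem.Str.join "-" (P.take t)

-- hyphen-free token lists
def pvHF (u : List String) : Prop := ∀ s ∈ u, '-' ∉ s.toList

-- first-match over a key list (what A's break loop computes, after mapping)
def pvFirstMatch (pc : PySem.Dict String Int) (d : String) : List String → String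
  | [] => d
  | k :: ks => if pc.getD k 0 ≥ 2 then k else pvFirstMatch pc d ks

theorem pv_dash_toList : ("-" : String).toList = ['-'] := by decide

theorem pv_join_singleton (p : String) : PySem.Str.join "-" [p] = p := by
  apply String.toList_injective
  rw [PySem.Str.toList_join]
  simp [PySem.Chars.join_singleton]

theorem pv_join_glue (p t : String) (l : List String) :
    PySem.Str.join "-" ((p ++ "-" ++ t) :: l) = PySem.Str.join "-" (p :: t :: l) := by
  apply String.toList_injective
  rw [PySem.Str.toList_join, PySem.Str.toList_join]
  cases l with
  | nil =>
      simp [PySem.Chars.join_singleton, PySem.Chars.join_cons_cons, pv_dash_toList,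
        List.append_assoc]
  | cons q l' =>
      simp [PySem.Chars.join_cons_cons, pv_dash_toList, List.append_assoc]

-- the keys A builds (join of take (k+1)) are exactly pvPrefSeq
theorem pv_prefSeq_eq (ts : List String) : ∀ p : String,
    pvPrefSeq p ts = (List.range ts.length).map (fun k => pvK (p :: ts) (k + 1)) := by
  induction ts with
  | nil => intro p; simp [pvPrefSeq]
  | cons t ts ih =>
      intro p
      rw [List.length_cons, List.range_succ_eq_map]
      simp only [pvPrefSeq, List.map_cons, List.map_map]
      congr 1
      · simp [pvK, pv_join_singleton]
      · rw [ih (p ++ "-" ++ t)]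
        apply List.map_congr_left
        intro k _
        simp only [Function.comp, pvK, List.take_succ_cons]
        exact pv_join_glue p t (ts.take k)

-- A's range-indexed key list equals pvPrefSeq
theorem pv_map_keys (p : String) (ts : List String) :
    (PySem.List.pyRange 1 (((p :: ts) : List String).length : Int) 1).map (pvKeyAt (p :: ts))
      = pvPrefSeq p ts := by
  rw [PySem.List.pyRange_one, List.map_map, pv_prefSeq_eq ts p]
  have hlen : ((((p :: ts) : List String).length : Int) - 1).toNat = ts.length := by
    simp
  rw [hlen]
  apply List.map_congr_left
  intro k _
  simp only [Function.comp, pvKeyAt, pvK]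
  have : (1 : Int) + (k : Int) = ((k + 1 : Nat) : Int) := by push_cast; ring
  rw [this, PySem.List.slice_to_natCast]

-- ---------- split facts ----------

theorem pv_go_eq (fuel : Nat) : ∀ (l cur : List Char) (acc : List (List Char)),
    l.length ≤ fuel →
    PySem.Chars.splitOn.go ['-'] fuel l cur acc
      = acc.reverse ++ List.splitOnP.go (· == '-') l cur := by
  induction fuel with
  | zero =>
      intro l cur acc h
      have : l = [] := List.eq_nil_of_length_eq_zero (Nat.le_zero.mp h)
      subst this
      simp [PySem.Chars.splitOn.go, List.splitOnP.go]
  | succ fuel ih =>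
      intro l cur acc h
      cases l with
      | nil => simp [PySem.Chars.splitOn.go, List.splitOnP.go]
      | cons c rest =>
          simp only [PySem.Chars.splitOn.go, List.splitOnP.go]
          by_cases hc : c = '-'
          · subst hc
            have hpre : List.isPrefixOf ['-'] ('-' :: rest) = true := by
              simp [List.isPrefixOf]
            rw [if_pos hpre]
            rw [show List.drop (['-'] : List Char).length ('-' :: rest) = rest by simp]
            rw [ih rest [] (cur.reverse :: acc) (by simpa using Nat.le_of_succ_le_succ (by simpa using h))]
            simp
          · have hpre : List.isPrefixOf ['-'] (c :: rest) = false := by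
              simp [List.isPrefixOf]
              exact fun e => hc e.symm
            rw [if_neg (by simp [hpre])]
            rw [ih rest (c :: cur) acc (by simpa using Nat.le_of_succ_le_succ h)]
            simp [hc]

theorem pv_splitOn_eq (s : List Char) :
    PySem.Chars.splitOn s ['-'] = s.splitOn '-' := by
  rw [PySem.Chars.splitOn, pv_go_eq _ _ _ _ (Nat.le_succ _)]
  rfl

theorem pv_splitOnP_go_hf (l : List Char) : ∀ (cur : List Char), '-' ∉ cur →
    ∀ piece ∈ List.splitOnP.go (· == '-') l cur, '-' ∉ piece := by
  induction l with
  | nil =>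
      intro cur h piece hp
      simp [List.splitOnP.go] at hp
      subst hp; simpa using h
  | cons c rest ih =>
      intro cur h piece hp
      simp only [List.splitOnP.go] at hp
      by_cases hc : c = '-'
      · subst hc
        simp at hp
        rcases hp with hp | hp
        · subst hp; simpa using h
        · exact ih [] (by simp) piece hp
      · rw [if_neg (by simpa using hc)] at hp
        exact ih (c :: cur) (by simp [h]; exact fun e => hc e.symm) piece hp

theorem pv_peel_toList (n : String) :
    (pvPeel n).map String.toList = n.toList.splitOn '-' := by
  have h := PySem.Str.split?_map n "-"
  rw [show ("-" : String).toList = ['-'] by decide] at h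
  rw [show PySem.Chars.split? n.toList ['-'] = some (PySem.Chars.splitOn n.toList ['-']) from rfl] at h
  cases hs : PySem.Str.split? n "-" with
  | none => rw [hs] at h; simp at h
  | some u =>
      rw [hs] at h
      simp only [Option.map_some, Option.some.injEq] at h
      simp [pvPeel, hs, h, pv_splitOn_eq]

theorem pv_peel_ne_nil (n : String) : pvPeel n ≠ [] := by
  intro h
  have := pv_peel_toList n
  rw [h] at this
  exact List.splitOnP_ne_nil _ _ this.symm

theorem pv_peel_hf (n : String) : pvHF (pvPeel n) := by
  intro s hs
  have hm : s.toList ∈ (pvPeel n).map String.toList := List.mem_map_of_mem hs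
  rw [pv_peel_toList] at hm
  exact pv_splitOnP_go_hf _ [] (by simp) _ hm

-- join is injective on nonempty hyphen-free token lists
theorem pv_join_inj (u v : List String) (hu : pvHF u) (hv : pvHF v)
    (hu0 : u ≠ []) (hv0 : v ≠ [])
    (h : PySem.Str.join "-" u = PySem.Str.join "-" v) : u = v := by
  have h' := congrArg String.toList h
  rw [PySem.Str.toList_join, PySem.Str.toList_join,
    show ("-" : String).toList = ['-'] by decide] at h'
  have hi : PySem.Chars.join ['-'] (u.map String.toList) = List.intercalate ['-'] (u.map String.toList) := rfl
  have hiv : PySem.Chars.join ['-'] (v.map String.toList) = List.intercalate ['-'] (v.map String.toList) := rfl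
  rw [hi, hiv] at h'
  have hsp := congrArg (fun l => List.splitOn '-' l) h'
  simp only at hsp
  rw [List.splitOn_intercalate (x := '-') (ls := u.map String.toList) (by intro l hl; rcases List.mem_map.mp hl with ⟨s, hs, rfl⟩; exact hu s hs) (by simpa using hu0),
      List.splitOn_intercalate (x := '-') (ls := v.map String.toList) (by intro l hl; rcases List.mem_map.mp hl with ⟨s, hs, rfl⟩; exact hv s hs) (by simpa using hv0)] at hsp
  exact List.map_injective_iff.mpr (fun a b => String.toList_injective) hsp

-- ---------- lcp / cap facts ----------

theorem pvLcpB_nonneg (P Q : List String) : 0 ≤ pvLcpB P Q := by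
  induction P generalizing Q with
  | nil => cases Q <;> simp [pvLcpB]
  | cons x a ih =>
      cases Q with
      | nil => simp [pvLcpB]
      | cons y b =>
          simp only [pvLcpB]
          split_ifs
          · have := ih b; omega
          · omega

theorem pv_take_eq_iff_le_lcp (P : List String) : ∀ (Q : List String) (t : Nat),
    t ≤ P.length → t ≤ Q.length →
    (P.take t = Q.take t ↔ (t : Int) ≤ pvLcpB P Q) := by
  induction P with
  | nil =>
      intro Q t h1 h2
      have : t = 0 := Nat.le_zero.mp h1
      subst this
      simp [pvLcpB_nonneg]
  | cons x a ih =>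
      intro Q t h1 h2
      cases t with
      | zero => simp [pvLcpB_nonneg]
      | succ t =>
          cases Q with
          | nil => simp at h2
          | cons y b =>
              simp only [List.take_succ_cons, pvLcpB, List.cons.injEq]
              by_cases hxy : x = y
              · subst hxy
                rw [if_pos rfl]
                have := ih b t (by simpa using h1) (by simpa using h2)
                constructor
                · rintro ⟨-, h⟩
                  have := this.mp h; push_cast; omega
                · intro h
                  refine ⟨rfl, this.mpr ?_⟩
                  push_cast at h; omega
              · rw [if_neg hxy]
                constructor
                · rintro ⟨h, -⟩; exact absurd h hxy
                · intro h; omega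

theorem pv_le_cap_iff (P Q : List String) (t : Nat)
    (hP : P ≠ []) (hQ : Q ≠ []) :
    ((t : Int) ≤ pvCap P Q) ↔ (t ≤ P.length - 1 ∧ t ≤ Q.length - 1 ∧ Q.take t = P.take t) := by
  have hP1 : 1 ≤ P.length := List.length_pos_of_ne_nil hP
  have hQ1 : 1 ≤ Q.length := List.length_pos_of_ne_nil hQ
  unfold pvCap
  rw [le_min_iff, le_min_iff]
  constructor
  · rintro ⟨⟨hl, hp⟩, hq⟩
    have h1 : t ≤ P.length - 1 := by omega
    have h2 : t ≤ Q.length - 1 := by omega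
    refine ⟨h1, h2, ?_⟩
    exact ((pv_take_eq_iff_le_lcp P Q t (by omega) (by omega)).mpr hl).symm
  · rintro ⟨h1, h2, h3⟩
    refine ⟨⟨?_, by omega⟩, by omega⟩
    exact (pv_take_eq_iff_le_lcp P Q t (by omega) (by omega)).mp h3.symm

-- fold-max spec
theorem pv_fold_max_spec (P : List String) (L : List (List String)) :
    ∀ b0 : Int,
    b0 ≤ L.foldl (fun b Q => if pvCap P Q > b then pvCap P Q else b) b0 ∧
    ((L.foldl (fun b Q => if pvCap P Q > b then pvCap P Q else b) b0) = b0
      ∨ ∃ Q ∈ L, (L.foldl (fun b Q => if pvCap P Q > b then pvCap P Q else b) b0) = pvCap P Q) ∧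
    (∀ Q ∈ L, pvCap P Q ≤ L.foldl (fun b Q => if pvCap P Q > b then pvCap P Q else b) b0) := by
  induction L with
  | nil => intro b0; simp
  | cons Q0 L ih =>
      intro b0
      simp only [List.foldl_cons]
      set b1 := if pvCap P Q0 > b0 then pvCap P Q0 else b0 with hb1
      obtain ⟨h1, h2, h3⟩ := ih b1
      have hb0 : b0 ≤ b1 := by rw [hb1]; split_ifs with h <;> omega
      have hQ0 : pvCap P Q0 ≤ b1 := by rw [hb1]; split_ifs with h <;> omega
      refine ⟨by omega, ?_, ?_⟩
      · rcases h2 with h2 | ⟨Q, hQ, hE⟩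
        · rw [h2, hb1]
          split_ifs with h
          · exact Or.inr ⟨Q0, by simp⟩
          · exact Or.inl rfl
        · exact Or.inr ⟨Q, by simp [hQ], hE⟩
      · intro Q hQ
        rcases List.mem_cons.mp hQ with rfl | hQ
        · omega
        · exact h3 Q hQ

-- fold over enumerate with all indices ≠ i: the skip branch never fires
theorem pv_fold_enum_noskip (P : List String) (i : Int) :
    ∀ (xs : List (List String)) (s : Int) (b : Int),
    (∀ q ∈ PySem.List.enumerate xs s, q.1 ≠ i) →
    (PySem.List.enumerate xs s).foldl
        (fun best jq => if jq.1 ≠ i then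
          (if pvCap P jq.2 > best then pvCap P jq.2 else best) else best) b
      = xs.foldl (fun b Q => if pvCap P Q > b then pvCap P Q else b) b := by
  intro xs
  induction xs with
  | nil => intro s b h; simp [PySem.List.enumerate_nil]
  | cons x xs ih =>
      intro s b h
      rw [PySem.List.enumerate_cons]
      simp only [List.foldl_cons]
      rw [if_pos (h (s, x) (by rw [PySem.List.enumerate_cons]; exact List.mem_cons_self))]
      exact ih (s+1) _ (fun q hq => h q (by rw [PySem.List.enumerate_cons]; exact List.mem_cons_of_mem _ hq))

-- B's inner loop over enumerate(toks) with the self index skipped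
theorem pv_inner_fold (P : List String) (T₁ T₂ : List (List String)) :
    (PySem.List.enumerate (T₁ ++ P :: T₂) 0).foldl
      (fun best jq => if jq.1 ≠ (T₁.length : Int) then
          (if pvCap P jq.2 > best then pvCap P jq.2 else best) else best) (0 : Int)
    = (T₁ ++ T₂).foldl (fun b Q => if pvCap P Q > b then pvCap P Q else b) 0 := by
  rw [PySem.List.enumerate_append, List.foldl_append, PySem.List.enumerate_cons, List.foldl_cons]
  rw [pv_fold_enum_noskip P (T₁.length : Int) T₁ 0 0
    (by intro q hq
        rcases (PySem.List.mem_enumerate_iff _ _ _).mp hq with ⟨k, hk, rfl⟩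
        simp; omega)]
  rw [if_neg (show ¬((0 + (T₁.length : Int), P).1 ≠ (T₁.length : Int)) by simp)]
  rw [pv_fold_enum_noskip P (T₁.length : Int) T₂ _ _
    (by intro q hq
        rcases (PySem.List.mem_enumerate_iff _ _ _).mp hq with ⟨k, hk, rfl⟩
        simp; omega)]
  rw [List.foldl_append]

-- ---------- firstMatch facts ----------

theorem pv_firstMatch_all_neg (pc : PySem.Dict String Int) (d : String)
    (ks : List String) (h : ∀ x ∈ ks, ¬ pc.getD x 0 ≥ 2) :
    pvFirstMatch pc d ks = d := by
  induction ks with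
  | nil => rfl
  | cons k ks ih =>
      simp only [pvFirstMatch]
      rw [if_neg (h k List.mem_cons_self)]
      exact ih (fun x hx => h x (List.mem_cons_of_mem _ hx))

theorem pv_firstMatch_rev_map (pc : PySem.Dict String Int) (d : String)
    (f : Nat → String) : ∀ (n j : Nat), j < n → pc.getD (f j) 0 ≥ 2 →
    (∀ m, j < m → m < n → ¬ pc.getD (f m) 0 ≥ 2) →
    pvFirstMatch pc d (((List.range n).map f).reverse) = f j := by
  intro n
  induction n with
  | zero => intro j hj; omega
  | succ n ih =>
      intro j hj hpj hafter
      rw [List.range_succ, List.map_append, List.reverse_append]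
      simp only [List.map_cons, List.map_nil, List.reverse_cons, List.reverse_nil,
        List.nil_append, List.cons_append, pvFirstMatch]
      by_cases hjn : j = n
      · subst hjn
        rw [if_pos hpj]
      · have hj' : j < n := by omega
        rw [if_neg (hafter n (by omega) (by omega))]
        exact ih j hj' hpj (fun m h1 h2 => hafter m h1 (by omega))

-- A's backward break loop, for a nonempty token list
theorem pv_bestLoop_eq (pc : PySem.Dict String Int) (parts : List String) :
    ∀ il : List Int,
    pvBestLoop pc parts il = pvFirstMatch pc "" (il.map (pvKeyAt parts)) := by
  intro il
  induction il with
  | nil => rfl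
  | cons i il ih => simp only [pvBestLoop, pvFirstMatch, List.map_cons]; rw [ih]

theorem pv_bestLoop_rev (pc : PySem.Dict String Int) (p : String) (ts : List String) :
    pvBestLoop pc (p :: ts)
        (PySem.List.pyRange ((((p :: ts) : List String).length : Int) - 1) 0 (-1))
      = pvFirstMatch pc "" ((pvPrefSeq p ts).reverse) := by
  rw [pv_bestLoop_eq]
  congr 1
  rw [PySem.List.pyRange_neg_one_eq_reverse, List.map_reverse]
  congr 1
  rw [show ((0 : Int) + 1) = 1 by norm_num,
      show (((((p :: ts) : List String).length : Int) - 1) + 1) = (((p :: ts) : List String).length : Int) by ring]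
  exact pv_map_keys p ts

-- ---------- counting facts ----------

theorem pv_key_eq_iff (P Q : List String) (hP : pvHF P) (hQ : pvHF Q)
    (s t : Nat) (hs1 : 1 ≤ s) (hsl : s ≤ Q.length) (ht1 : 1 ≤ t) (htl : t ≤ P.length) :
    pvK Q s = pvK P t ↔ (s = t ∧ Q.take t = P.take t) := by
  constructor
  · intro h
    have hq : Q.take s ≠ [] := by
      intro he
      have := congrArg List.length he
      rw [List.length_take] at this
      simp only [List.length_nil] at this
      omega
    have hp : P.take t ≠ [] := by
      intro he
      have := congrArg List.length he
      rw [List.length_take] at this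
      simp only [List.length_nil] at this
      omega
    have := pv_join_inj (Q.take s) (P.take t)
      (fun x hx => hQ x (List.mem_of_mem_take hx))
      (fun x hx => hP x (List.mem_of_mem_take hx)) hq hp h
    have hlen := congrArg List.length this
    simp [List.length_take] at hlen
    have hst : s = t := by omega
    subst hst
    exact ⟨rfl, this⟩
  · rintro ⟨rfl, h⟩
    simp [pvK, h]

theorem pv_count_prefSeqOf (P : List String) (n : String) (hP : pvHF P)
    (t : Nat) (ht1 : 1 ≤ t) (htl : t ≤ P.length) :
    (pvPrefSeqOf (pvPeel n)).count (pvK P t)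
      = if t ≤ (pvPeel n).length - 1 ∧ (pvPeel n).take t = P.take t then 1 else 0 := by
  obtain ⟨q, us, hqs⟩ := List.exists_cons_of_ne_nil (pv_peel_ne_nil n)
  have hQhf : pvHF (q :: us) := hqs ▸ pv_peel_hf n
  rw [hqs]
  simp only [pvPrefSeqOf, List.length_cons]
  rw [pv_prefSeq_eq us q, List.count_eq_countP, List.countP_map]
  rw [List.countP_congr (q := fun k => decide (k + 1 = t ∧ (q :: us).take t = P.take t))
    (by
      intro k hk
      have hk' : k < us.length := List.mem_range.mp hk
      simp only [Function.comp, beq_iff_eq, decide_eq_true_eq]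
      exact pv_key_eq_iff P (q :: us) hP hQhf (k + 1) t (by omega)
        (by simp; omega) ht1 htl)]
  by_cases hC : (q :: us).take t = P.take t
  · simp only [hC, and_true]
    rw [List.countP_congr (q := fun k => k == t - 1)
      (by intro k hk; simp; omega)]
    rw [← List.count_eq_countP, List.count_range]
    have : t - 1 < us.length ↔ t ≤ us.length := by omega
    split_ifs with h1 h2 h2 <;> omega
  · simp only [hC, and_false]
    rw [List.countP_eq_zero.mpr (by intro k hk; simp)]
    simp

theorem pv_count_flatMap (l : List String) (g : String → List String) (y : String) :
    (l.flatMap g).count y = (l.map (fun x => (g x).count y)).sum := by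
  induction l with
  | nil => simp
  | cons x xs ih => simp [List.flatMap_cons, List.count_append, ih]

-- A's prefix_counts dict is the counter of all hyphen prefixes of all names
theorem pv_counts_counter (repo_names : List String) :
    repo_names.foldl (fun pc name =>
      let parts := pvPeel name
      (PySem.List.pyRange 1 (parts.length : Int) 1).foldl (fun pc i =>
        let pre := pvKeyAt parts i
        pc.insert pre (pc.getD pre 0 + 1)) pc)
      PySem.Dict.empty
    = PySem.Dict.counter (repo_names.flatMap (fun n => pvPrefSeqOf (pvPeel n))) := by
  rw [← PySem.Dict.foldl_insert_getD_add_one_eq_counter, List.foldl_flatMap]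
  apply PySem.List.foldl_congr_mem
  intro pc name _
  simp only []
  obtain ⟨q, us, hqs⟩ := List.exists_cons_of_ne_nil (pv_peel_ne_nil name)
  rw [hqs]
  simp only [pvPrefSeqOf]
  rw [← pv_map_keys q us, List.foldl_map]

-- count ≥ 2 iff some OTHER name shares the prefix as a proper prefix
theorem pv_count_ge_two_iff (names : List String) (k : Nat) (hk : k < names.length)
    (t : Nat) (ht1 : 1 ≤ t) (htl : t ≤ (pvPeel names[k]).length - 1) :
    (2 ≤ (names.flatMap (fun n => pvPrefSeqOf (pvPeel n))).count (pvK (pvPeel names[k]) t))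
    ↔ ∃ n ∈ names.take k ++ names.drop (k + 1),
        t ≤ (pvPeel n).length - 1 ∧ (pvPeel n).take t = (pvPeel names[k]).take t := by
  have hsplit : names = names.take k ++ names[k] :: names.drop (k + 1) := by
    conv_lhs => rw [← List.take_append_drop k names]
    rw [List.drop_eq_getElem_cons hk]
  rw [pv_count_flatMap]
  generalize hx : names[k] = x0 at htl hsplit ⊢
  have hPhf : pvHF (pvPeel x0) := pv_peel_hf x0
  have hP1 : 1 ≤ (pvPeel x0).length := List.length_pos_of_ne_nil (pv_peel_ne_nil x0)
  have htP : t ≤ (pvPeel x0).length := by omega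
  conv_lhs => rw [hsplit]
  rw [List.map_append, List.map_cons, List.sum_append, List.sum_cons]
  have hself : (pvPrefSeqOf (pvPeel x0)).count (pvK (pvPeel x0) t) = 1 := by
    rw [pv_count_prefSeqOf _ _ hPhf t ht1 htP]
    simp [htl]
  rw [hself]
  have hrw : ∀ (l : List String),
      (l.map (fun n => (pvPrefSeqOf (pvPeel n)).count (pvK (pvPeel x0) t))).sum
        = l.countP (fun n => decide (t ≤ (pvPeel n).length - 1 ∧ (pvPeel n).take t = (pvPeel x0).take t)) := by
    intro l
    induction l with
    | nil => simp
    | cons x xs ih =>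
        simp only [List.map_cons, List.sum_cons, List.countP_cons, ih]
        rw [pv_count_prefSeqOf _ _ hPhf t ht1 htP]
        by_cases h : (t ≤ (pvPeel x).length - 1 ∧ (pvPeel x).take t = (pvPeel x0).take t)
        · rw [if_pos h, if_pos (by simp [h])]; omega
        · rw [if_neg h, if_neg (by simp [h])]; omega
  rw [hrw, hrw]
  have hApp : (names.take k ++ names.drop (k + 1)).countP
        (fun n => decide (t ≤ (pvPeel n).length - 1 ∧ (pvPeel n).take t = (pvPeel x0).take t))
      = (names.take k).countP
          (fun n => decide (t ≤ (pvPeel n).length - 1 ∧ (pvPeel n).take t = (pvPeel x0).take t))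
        + (names.drop (k + 1)).countP
          (fun n => decide (t ≤ (pvPeel n).length - 1 ∧ (pvPeel n).take t = (pvPeel x0).take t)) :=
    List.countP_append
  constructor
  · intro h
    have hpos : 0 < (names.take k ++ names.drop (k + 1)).countP
        (fun n => decide (t ≤ (pvPeel n).length - 1 ∧ (pvPeel n).take t = (pvPeel x0).take t)) := by
      rw [hApp]; omega
    rcases List.countP_pos_iff.mp hpos with ⟨n, hn, hcond⟩
    exact ⟨n, hn, by simpa using hcond⟩
  · rintro ⟨n, hn, hcond⟩
    have hpos : 0 < (names.take k ++ names.drop (k + 1)).countP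
        (fun n => decide (t ≤ (pvPeel n).length - 1 ∧ (pvPeel n).take t = (pvPeel x0).take t)) :=
      List.countP_pos_iff.mpr ⟨n, hn, by simpa using hcond⟩
    rw [hApp] at hpos
    omega

-- ---------- the per-name value ----------

theorem pv_value_eq (names : List String) (k : Nat) (hk : k < names.length) :
    pvBestLoop (PySem.Dict.counter (names.flatMap (fun n => pvPrefSeqOf (pvPeel n))))
        (pvPeel names[k])
        (PySem.List.pyRange (((pvPeel names[k]).length : Int) - 1) 0 (-1))
      = PySem.Str.join "-" (PySem.List.slice (pvPeel names[k]) none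
          (some (((names.take k ++ names.drop (k + 1)).map pvPeel).foldl
            (fun b Q => if pvCap (pvPeel names[k]) Q > b then pvCap (pvPeel names[k]) Q else b) 0))) := by
  obtain ⟨p, ts, hP⟩ := List.exists_cons_of_ne_nil (pv_peel_ne_nil names[k])
  rw [hP]
  rw [pv_bestLoop_rev]
  obtain ⟨h0, hcases, hub⟩ :=
    pv_fold_max_spec (p :: ts) ((names.take k ++ names.drop (k + 1)).map pvPeel) 0
  set L := (names.take k ++ names.drop (k + 1)).map pvPeel with hL
  set r := L.foldl (fun b Q => if pvCap (p :: ts) Q > b then pvCap (p :: ts) Q else b) 0 with hr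
  have hLne : ∀ Q ∈ L, Q ≠ [] := by
    intro Q hQ
    rcases List.mem_map.mp hQ with ⟨n, _, rfl⟩
    exact pv_peel_ne_nil n
  have hkey : ∀ t : Nat, 1 ≤ t → t ≤ ts.length →
      ((PySem.Dict.counter (names.flatMap (fun n => pvPrefSeqOf (pvPeel n)))).getD (pvK (p :: ts) t) 0 ≥ 2
        ↔ ∃ Q ∈ L, t ≤ Q.length - 1 ∧ Q.take t = (p :: ts).take t) := by
    intro t ht1 ht2
    rw [PySem.Dict.getD_counter]
    have hcnt := pv_count_ge_two_iff names k hk t ht1 (by rw [hP]; simp; omega)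
    rw [hP] at hcnt
    constructor
    · intro h2
      rcases hcnt.mp (by exact_mod_cast h2) with ⟨n, hn, hc⟩
      exact ⟨pvPeel n, List.mem_map_of_mem hn, hc⟩
    · rintro ⟨Q, hQ, hc⟩
      rcases List.mem_map.mp hQ with ⟨n, hn, rfl⟩
      exact_mod_cast Nat.cast_le.mpr (hcnt.mpr ⟨n, hn, hc⟩)
  by_cases hr1 : 1 ≤ r
  · rcases hcases with hc0 | ⟨Q₀, hQ₀, hrQ⟩
    · omega
    · have hbr : ((r.toNat : Int)) = r := Int.toNat_of_nonneg h0
      have hcap := (pv_le_cap_iff (p :: ts) Q₀ r.toNat (by simp) (hLne Q₀ hQ₀)).mp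
        (by rw [hbr, hrQ])
      have hble : r.toNat ≤ ts.length := by
        have := hcap.1; simpa using this
      have hb1 : 1 ≤ r.toNat := by omega
      rw [← hbr, PySem.List.slice_to_natCast]
      rw [pv_prefSeq_eq]
      rw [pv_firstMatch_rev_map _ _ _ ts.length (r.toNat - 1) (by omega)
        (by rw [show r.toNat - 1 + 1 = r.toNat by omega]
            exact (hkey r.toNat hb1 hble).mpr ⟨Q₀, hQ₀, hcap.2.1, hcap.2.2⟩)
        (by intro m h1 h2 hge
            rcases (hkey (m + 1) (by omega) (by omega)).mp hge with ⟨Q, hQ, hm1, hm2⟩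
            have hle : ((m + 1 : Nat) : Int) ≤ pvCap (p :: ts) Q :=
              (pv_le_cap_iff (p :: ts) Q (m + 1) (by simp) (hLne Q hQ)).mpr
                ⟨by simp; omega, hm1, hm2⟩
            have := hub Q hQ
            omega)]
      rw [show r.toNat - 1 + 1 = r.toNat by omega]
      rfl
  · have hr0 : r = 0 := by omega
    rw [hr0]
    rw [show (0 : Int) = ((0 : Nat) : Int) from rfl, PySem.List.slice_to_natCast]
    simp only [List.take_zero]
    rw [pv_prefSeq_eq]
    rw [pv_firstMatch_all_neg _ _ _
      (by intro x hx
          rw [List.mem_reverse] at hx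
          rcases List.mem_map.mp hx with ⟨m, hm, rfl⟩
          have hmr : m < ts.length := List.mem_range.mp hm
          intro hge
          rcases (hkey (m + 1) (by omega) (by omega)).mp hge with ⟨Q, hQ, hm1, hm2⟩
          have hle : ((m + 1 : Nat) : Int) ≤ pvCap (p :: ts) Q :=
            (pv_le_cap_iff (p :: ts) Q (m + 1) (by simp) (hLne Q hQ)).mpr
              ⟨by simp; omega, hm1, hm2⟩
          have := hub Q hQ
          omega)]
    rfl

-- names.foldl f = fold of f over the names projected out of enumerate(zip names toks)
theorem pv_foldl_over_names (f : PySem.Dict String String → String → PySem.Dict String String)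
    (names : List String) (toks : List (List String)) (hlen : names.length ≤ toks.length)
    (d : PySem.Dict String String) :
    names.foldl f d
      = (PySem.List.enumerate (names.zip toks) 0).foldl (fun res p => f res p.2.1) d := by
  conv_lhs => rw [← List.map_fst_zip (l₁ := names) (l₂ := toks) hlen]
  rw [List.foldl_map]
  conv_lhs => rw [← PySem.List.map_snd_enumerate (names.zip toks) 0]
  rw [List.foldl_map]

-- ===== VERDICT (by name: the statement is the Claim_ definition above) =====
theorem compute_assignment_groups_spec : Claim_equal_compute_assignment_groups := by
  intro repo_names _
  unfold Spec_compute_assignment_groups compute_assignment_groups compute_assignment_groups_alt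
  simp only []
  rw [pv_counts_counter repo_names]
  congr 1
  rw [pv_foldl_over_names
    (fun res name => res.insert name
      (pvBestLoop (PySem.Dict.counter (repo_names.flatMap (fun n => pvPrefSeqOf (pvPeel n))))
        (pvPeel name)
        (PySem.List.pyRange (((pvPeel name).length : Int) - 1) 0 (-1))))
    repo_names (repo_names.map (fun name => pvPeel name)) (by simp) PySem.Dict.empty]
  apply PySem.List.foldl_congr_mem
  intro res p hp
  rcases (PySem.List.mem_enumerate_iff _ _ _).mp hp with ⟨j, hj, rfl⟩
  have hj' : j < repo_names.length := by
    simpa using hj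
  have hget : (repo_names.zip (repo_names.map (fun name => pvPeel name)))[j]
      = (repo_names[j], pvPeel repo_names[j]) := by
    rw [List.getElem_zip, List.getElem_map]
  simp only [hget, zero_add]
  have hsplit : repo_names = repo_names.take j ++ repo_names[j] :: repo_names.drop (j + 1) := by
    conv_lhs => rw [← List.take_append_drop j repo_names]
    rw [List.drop_eq_getElem_cons hj']
  have hdecomp : repo_names.map (fun name => pvPeel name)
      = (repo_names.take j).map pvPeel ++ pvPeel repo_names[j] :: (repo_names.drop (j + 1)).map pvPeel := by
    conv_lhs => rw [hsplit]
    rw [List.map_append, List.map_cons]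
  have hidx : (j : Int) = (((repo_names.take j).map pvPeel).length : Int) := by
    simp
    omega
  rw [hdecomp, hidx, pv_inner_fold, ← List.map_append]
  rw [pv_value_eq repo_names j hj']
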